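-- pv_equiv track=rewrite | github.com/Mr-Vipul/TcsCodeVita-2024 | C.py | calculate_value_of_string
-- ===== SOURCE A (Python) =====
-- from collections import deque, defaultdict
--
-- def calculate_value_of_string(n, edges, query_string):
--     # Step 1: Build the graph
--     graph = defaultdict(list)
--     in_degree = defaultdict(int)
--     all_words = set()
--
--     # Read the edges and build the graph
--     for word1, word2 in edges:
--         graph[word1].append(word2)
--         in_degree[word2] += 1
--         all_words.add(word1)
--         all_words.add(word2)
--
--     # Step 2: Find the level of each word using BFS or DFS
--     levels = {}
--     queue = deque()
--
--     # Add all words with no incoming edges (root nodes)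
--     for word in all_words:
--         if in_degree[word] == 0:
--             queue.append(word)
--             levels[word] = 1  # Root level is 1
--
--     # BFS to compute the levels
--     while queue:
--         current = queue.popleft()
--         current_level = levels[current]
--
--         for neighbor in graph[current]:
--             if neighbor not in levels:  # If the neighbor has not been visited
--                 levels[neighbor] = current_level + 1
--                 queue.append(neighbor)
--
--     # Step 3: Calculate the value of the query string
--     total_value = 0
--     for word in query_string:
--         if word in levels:
--             total_value += levels[word]
--         else:
--             total_value += -1  # If the word is not in the hierarchy
--
--     return total_value
-- ===== SOURCE B (Python) =====
-- def calculate_value_of_string(n, edges, query_string):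
--     # Bellman-Ford-style relaxation: no queue/BFS at all.  Start every non-target
--     # word at level 1 and repeatedly relax all edges (synchronously, reading the
--     # previous round's levels) until a fixpoint; unreached words stay absent.
--     words = {w for e in edges for w in e}
--     targets = {b for _, b in edges}
--     level = {w: 1 for w in words if w not in targets}
--     for _ in range(len(words)):
--         new = dict(level)
--         for a, b in edges:
--             if a in level and (b not in new or level[a] + 1 < new[b]):
--                 new[b] = level[a] + 1
--         if new == level:
--             break
--         level = new
--     return sum(level.get(w, -1) for w in query_string)
-- ===== Notes on version B (the rewrite author's own statement) =====
-- stated objective: alternative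
-- what changed: Replaces A's BFS from the zero-in-degree roots (deque, adjacency lists, in-degree counter) by a Bellman-Ford-style algorithm: start every non-target word at level 1 and repeatedly relax all edges synchronously (reading only the previous round's levels) until a fixpoint, at most len(words) rounds; unreached words stay absent and score -1.
import Mathlib
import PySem

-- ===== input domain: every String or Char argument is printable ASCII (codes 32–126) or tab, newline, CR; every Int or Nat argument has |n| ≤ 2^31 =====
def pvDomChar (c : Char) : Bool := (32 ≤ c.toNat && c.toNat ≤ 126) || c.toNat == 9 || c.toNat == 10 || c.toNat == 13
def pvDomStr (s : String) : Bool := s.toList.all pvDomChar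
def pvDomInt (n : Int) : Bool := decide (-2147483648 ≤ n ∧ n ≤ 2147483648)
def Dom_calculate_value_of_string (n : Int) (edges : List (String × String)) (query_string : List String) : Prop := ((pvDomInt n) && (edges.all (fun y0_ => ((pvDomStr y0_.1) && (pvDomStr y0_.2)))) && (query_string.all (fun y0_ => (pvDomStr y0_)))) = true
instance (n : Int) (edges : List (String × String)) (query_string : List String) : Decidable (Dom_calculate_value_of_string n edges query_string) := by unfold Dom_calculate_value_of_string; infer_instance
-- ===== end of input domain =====

-- B replaces A's queue BFS from the roots (deque + in-degree counter) by a Bellman-Ford-style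
-- synchronous edge-relaxation iterated to a fixpoint; objective: alternative (different algorithm,
-- same results, no speed claim).

-- ===== PORT A =====

-- `pvStep w s nb` is A's inner conditional:
-- "if nb not in levels: levels[nb] = w; queue.append(nb)" on the state s = (levels, queue).
def pvStep (w : Int) (s : PySem.Dict String Int × List String) (nb : String) :
    PySem.Dict String Int × List String :=
  if s.1.contains nb then s else (s.1.insert nb w, s.2 ++ [nb])

-- Number of words of R not yet assigned a level (termination measure component).
def pvFresh (R : List String) (levels : PySem.Dict String Int) : Nat :=
  (R.filter (fun w => !levels.contains w)).length

-- termination lemma: inserting a fresh member of R strictly shrinks pvFresh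
theorem pvFresh_insert_le (R : List String) (nb : String) (w : Int)
    (levels : PySem.Dict String Int) (hR : nb ∈ R) (hc : levels.contains nb = false) :
    pvFresh R (levels.insert nb w) + 1 ≤ pvFresh R levels := by
  obtain ⟨s, t, rfl⟩ := List.mem_iff_append.mp hR
  unfold pvFresh
  have mono : ∀ (l : List String),
      (l.filter (fun x => !(levels.insert nb w).contains x)).length ≤
      (l.filter (fun x => !levels.contains x)).length := by
    intro l
    refine (List.monotone_filter_right l ?_).length_le
    intro a ha
    simp only [PySem.Dict.contains_insert, Bool.not_eq_true', Bool.or_eq_false_iff] at ha ⊢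
    exact ha.2
  have h2 := mono s
  have h3 := mono t
  simp only [List.filter_append, List.length_append, List.filter_cons,
    PySem.Dict.contains_insert_self, hc, Bool.not_true, Bool.not_false, Bool.false_eq_true,
    if_false, if_true, List.length_cons]
  omega

-- termination lemma: one node expansion does not increase queue-length + 2·pvFresh (pop excluded)
theorem pvExpand_le (R : List String) (w : Int) :
    ∀ (ns : List String) (levels : PySem.Dict String Int) (q : List String),
    (∀ x ∈ ns, x ∈ R) →
    (ns.foldl (pvStep w) (levels, q)).2.length + 2 * pvFresh R (ns.foldl (pvStep w) (levels, q)).1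
      ≤ q.length + 2 * pvFresh R levels := by
  intro ns
  induction ns with
  | nil => intro levels q _; simp
  | cons nb ns ih =>
    intro levels q hsub
    simp only [List.foldl_cons, pvStep]
    by_cases hc : levels.contains nb = true
    · simp only [hc, if_true]
      exact ih levels q (fun x hx => hsub x (List.mem_cons_of_mem _ hx))
    · simp only [hc, if_false, Bool.false_eq_true]
      have hfresh : levels.contains nb = false := by
        cases h : levels.contains nb with
        | false => rfl
        | true => exact absurd h hc
      have h1 := ih (levels.insert nb w) (q ++ [nb])
        (fun x hx => hsub x (List.mem_cons_of_mem _ hx))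
      have h2 := pvFresh_insert_le R nb w levels (hsub nb (List.mem_cons_self)) hfresh
      simp only [List.length_append, List.length_cons, List.length_nil] at h1 ⊢
      omega

-- build loop: graph (adjacency), in_degree (counter), all_words (set), one pass over edges
def pvBuildA (edges : List (String × String)) :
    PySem.Dict String (List String) × PySem.Dict String Int × PySem.Set String :=
  edges.foldl
    (fun st e =>
      (st.1.insert e.1 (st.1.getD e.1 [] ++ [e.2]),      -- graph[word1].append(word2)
       st.2.1.insert e.2 (st.2.1.getD e.2 0 + 1),        -- in_degree[word2] += 1
       PySem.Set.add (PySem.Set.add st.2.2 e.1) e.2))    -- all_words.add(word1); add(word2)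
    (PySem.Dict.empty, PySem.Dict.empty, PySem.Set.empty)

-- "while queue: current = queue.popleft(); for neighbor in graph[current]: …"
-- levels[current] is ported as getD _ 0: the key is always present when a node is popped.
def pvBfsA (graph : PySem.Dict String (List String))
    (levels : PySem.Dict String Int) (queue : List String) : PySem.Dict String Int :=
  match queue with
  | [] => levels
  | c :: q =>
    let cl := levels.getD c 0
    let st := (graph.getD c []).foldl (pvStep (cl + 1)) (levels, q)
    pvBfsA graph st.1 st.2
termination_by queue.length + 2 * pvFresh graph.values.flatten levels
decreasing_by
  have hsub : ∀ x ∈ graph.getD c [], x ∈ graph.values.flatten := by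
    intro x hx
    rw [PySem.Dict.getD_eq_get?_getD] at hx
    cases hg : graph.get? c with
    | none => simp [hg] at hx
    | some v =>
      simp only [hg, Option.getD_some] at hx
      have : (c, v) ∈ graph.items := PySem.Dict.mem_items_of_get?_eq_some graph hg
      refine List.mem_flatten.mpr ⟨v, ?_, hx⟩
      simp only [PySem.Dict.values]
      exact List.mem_map.mpr ⟨(c, v), this, rfl⟩
  have h := pvExpand_le graph.values.flatten (levels.getD c 0 + 1) (graph.getD c []) levels q hsub
  simp only [List.length_cons]
  omega

def calculate_value_of_string (n : Int) (edges : List (String × String)) (query_string : List String) : Int :=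
  let b := pvBuildA edges
  let graph := b.1
  let in_degree := b.2.1
  let all_words := b.2.2
  -- roots: for word in all_words: if in_degree[word] == 0: queue.append(word); levels[word] = 1
  -- (Python iterates the set in hash order; the result is order-independent, insertion order used)
  let rt := all_words.foldl
    (fun (st : List String × PySem.Dict String Int) w =>
      if in_degree.getD w 0 == 0 then (st.1 ++ [w], st.2.insert w 1) else st)
    ([], PySem.Dict.empty)
  let levels := pvBfsA graph rt.2 rt.1
  -- total_value loop over query_string
  query_string.foldl
    (fun total w => if levels.contains w then total + levels.getD w 0 else total + (-1)) 0

-- ===== PORT B =====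

-- one relaxation round: "new = dict(level); for a, b in edges: if a in level and
-- (b not in new or level[a] + 1 < new[b]): new[b] = level[a] + 1"
-- level[a] is ported as getD _ 0: it is guarded by "a in level".
def pvRelax (edges : List (String × String)) (level : PySem.Dict String Int) :
    PySem.Dict String Int :=
  edges.foldl
    (fun new e =>
      if level.contains e.1 && (!(new.contains e.2) || level.getD e.1 0 + 1 < new.getD e.2 0)
      then new.insert e.2 (level.getD e.1 0 + 1) else new)
    level

-- Python's "new == level" on dicts is order-insensitive: same keys, same values.
def pvDictEq (d1 d2 : PySem.Dict String Int) : Bool :=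
  d1.items.all (fun kv => d2.get? kv.1 == some kv.2) &&
    d2.items.all (fun kv => d1.get? kv.1 == some kv.2)

-- "for _ in range(len(words)): new = relax(level); if new == level: break; level = new"
def pvIterRelax (edges : List (String × String)) : Nat → PySem.Dict String Int → PySem.Dict String Int
  | 0, level => level
  | k + 1, level =>
    let new := pvRelax edges level
    if pvDictEq new level then level else pvIterRelax edges k new

def calculate_value_of_string_alt (n : Int) (edges : List (String × String)) (query_string : List String) : Int :=
  -- words = {w for e in edges for w in e}; targets = {b for _, b in edges}
  let words := edges.foldl (fun s e => PySem.Set.add (PySem.Set.add s e.1) e.2) PySem.Set.empty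
  let targets := PySem.Set.ofList (edges.map (·.2))
  -- level = {w: 1 for w in words if w not in targets}
  -- (Python iterates the set in hash order; the result is order-independent, insertion order used)
  let level0 := words.foldl
    (fun (d : PySem.Dict String Int) w => if !targets.contains w then d.insert w 1 else d)
    PySem.Dict.empty
  let level := pvIterRelax edges words.length level0
  -- sum(level.get(w, -1) for w in query_string)
  (query_string.map (fun w => level.getD w (-1))).foldl (· + ·) 0

-- ===== PRECONDITION & SPEC =====
def Spec_calculate_value_of_string (n : Int) (edges : List (String × String)) (query_string : List String) (out : Int) : Prop := out = calculate_value_of_string_alt n edges query_string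
instance (n : Int) (edges : List (String × String)) (query_string : List String) (out : Int) : Decidable (Spec_calculate_value_of_string n edges query_string out) := by unfold Spec_calculate_value_of_string; infer_instance

-- ===== CLAIM (what is proved, stated in full; the proofs are below) =====
def Claim_equal_calculate_value_of_string : Prop := ∀ (n : Int) (edges : List (String × String)) (query_string : List String), Dom_calculate_value_of_string n edges query_string → Spec_calculate_value_of_string n edges query_string (calculate_value_of_string n edges query_string)

-- ===== LEMMAS AND PROOFS =====

-- pointwise (Python-==) equality of dicts
def pvPtEq (d1 d2 : PySem.Dict String Int) : Prop := ∀ w, d1.get? w = d2.get? w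

-- ghost intermediate: layered (frontier-by-frontier) BFS, the bridge between A's queue BFS
-- and B's relaxation rounds
def pvLayerFold (succ : PySem.Dict String (List String)) (w : Int)
    (st : PySem.Dict String Int × List String) (us : List String) :
    PySem.Dict String Int × List String :=
  us.foldl (fun s u => (succ.getD u []).foldl (pvStep w) s) st

theorem pvLayer_le (succ : PySem.Dict String (List String)) (w : Int) :
    ∀ (us : List String) (levels : PySem.Dict String Int) (q : List String),
    (pvLayerFold succ w (levels, q) us).2.length
      + 2 * pvFresh succ.values.flatten (pvLayerFold succ w (levels, q) us).1
      ≤ q.length + 2 * pvFresh succ.values.flatten levels := by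
  unfold pvLayerFold
  intro us
  induction us with
  | nil => intro levels q; simp
  | cons u us ih =>
    intro levels q
    simp only [List.foldl_cons]
    have hsub : ∀ x ∈ succ.getD u [], x ∈ succ.values.flatten := by
      intro x hx
      rw [PySem.Dict.getD_eq_get?_getD] at hx
      cases hg : succ.get? u with
      | none => simp [hg] at hx
      | some v =>
        simp only [hg, Option.getD_some] at hx
        have : (u, v) ∈ succ.items := PySem.Dict.mem_items_of_get?_eq_some succ hg
        refine List.mem_flatten.mpr ⟨v, ?_, hx⟩
        simp only [PySem.Dict.values]
        exact List.mem_map.mpr ⟨(u, v), this, rfl⟩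
    have h1 := pvExpand_le succ.values.flatten w (succ.getD u []) levels q hsub
    have h2 := ih ((succ.getD u []).foldl (pvStep w) (levels, q)).1
      ((succ.getD u []).foldl (pvStep w) (levels, q)).2
    simp only [Prod.mk.eta] at h2
    omega

def pvBfsB (succ : PySem.Dict String (List String))
    (levels : PySem.Dict String Int) (frontier : List String) (l : Int) :
    PySem.Dict String Int :=
  if frontier = [] then levels
  else
    let st := pvLayerFold succ (l + 1) (levels, []) frontier
    pvBfsB succ st.1 st.2 (l + 1)
termination_by frontier.length + 2 * pvFresh succ.values.flatten levels
decreasing_by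
  have h := pvLayer_le succ (l + 1) frontier levels []
  simp only [List.length_nil] at h
  have : frontier.length ≠ 0 := by
    intro h0
    exact ‹¬ frontier = []› (List.length_eq_zero_iff.mp h0)
  omega

-- a pvStep fold preserves keys already present, and their values
theorem pvStep_preserve (w : Int) :
    ∀ (ns : List String) (levels : PySem.Dict String Int) (q : List String) (c : String),
    levels.contains c = true →
    (ns.foldl (pvStep w) (levels, q)).1.contains c = true ∧
      (ns.foldl (pvStep w) (levels, q)).1.getD c 0 = levels.getD c 0 := by
  intro ns
  induction ns with
  | nil => intro levels q c hc; exact ⟨hc, rfl⟩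
  | cons nb ns ih =>
    intro levels q c hc
    simp only [List.foldl_cons, pvStep]
    by_cases h : levels.contains nb = true
    · simp only [h, if_true]; exact ih levels q c hc
    · simp only [h, Bool.false_eq_true, if_false]
      have hne : c ≠ nb := fun he => h (he ▸ hc)
      have hc' : (levels.insert nb w).contains c = true := by
        rw [PySem.Dict.contains_insert]; simp [hc]
      have := ih (levels.insert nb w) (q ++ [nb]) c hc'
      rw [PySem.Dict.getD_insert_of_ne _ _ _ hne] at this
      exact this

-- every element of the produced queue carries value w and is present
theorem pvStep_newinv (w : Int) :
    ∀ (ns : List String) (levels : PySem.Dict String Int) (q : List String),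
    (∀ c ∈ q, levels.contains c = true ∧ levels.getD c 0 = w) →
    ∀ c ∈ (ns.foldl (pvStep w) (levels, q)).2,
      (ns.foldl (pvStep w) (levels, q)).1.contains c = true ∧
        (ns.foldl (pvStep w) (levels, q)).1.getD c 0 = w := by
  intro ns
  induction ns with
  | nil => intro levels q hq; exact hq
  | cons nb ns ih =>
    intro levels q hq
    simp only [List.foldl_cons, pvStep]
    by_cases h : levels.contains nb = true
    · simp only [h, if_true]; exact ih levels q hq
    · simp only [h, Bool.false_eq_true, if_false]
      refine ih (levels.insert nb w) (q ++ [nb]) ?_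
      intro c hcmem
      rcases List.mem_append.mp hcmem with hcq | hcnb
      · obtain ⟨h1, h2⟩ := hq c hcq
        have hne : c ≠ nb := fun he => h (he ▸ h1)
        constructor
        · rw [PySem.Dict.contains_insert]; simp [h1]
        · rw [PySem.Dict.getD_insert_of_ne _ _ _ hne]; exact h2
      · have : c = nb := List.mem_singleton.mp hcnb
        subst this
        exact ⟨PySem.Dict.contains_insert_self _ _ _, PySem.Dict.getD_insert_self _ _ _ _⟩

-- the queue accumulator factors: a pvStep fold only appends
theorem pvStep_append (w : Int) :
    ∀ (ns : List String) (levels : PySem.Dict String Int) (p q : List String),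
    ns.foldl (pvStep w) (levels, p ++ q) =
      ((ns.foldl (pvStep w) (levels, q)).1, p ++ (ns.foldl (pvStep w) (levels, q)).2) := by
  intro ns
  induction ns with
  | nil => intro levels p q; rfl
  | cons nb ns ih =>
    intro levels p q
    simp only [List.foldl_cons, pvStep]
    by_cases h : levels.contains nb = true
    · simp only [h, if_true]; exact ih levels p q
    · simp only [h, Bool.false_eq_true, if_false, List.append_assoc]
      exact ih (levels.insert nb w) p (q ++ [nb])

-- queue BFS over one layer = the layered fold, then BFS on the rest
theorem pvQueue_layer (graph succ : PySem.Dict String (List String))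
    (hg : ∀ u, graph.getD u [] = succ.getD u []) (l : Int) :
    ∀ (xs : List String) (acc : List String) (levels : PySem.Dict String Int),
    (∀ c ∈ xs, levels.contains c = true ∧ levels.getD c 0 = l) →
    pvBfsA graph levels (xs ++ acc) =
      pvBfsA graph (pvLayerFold succ (l + 1) (levels, acc) xs).1
        (pvLayerFold succ (l + 1) (levels, acc) xs).2 := by
  intro xs
  induction xs with
  | nil => intro acc levels _; rfl
  | cons x xs ih =>
    intro acc levels hinv
    rw [List.cons_append, pvBfsA]
    obtain ⟨hcx, hgx⟩ := hinv x List.mem_cons_self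
    simp only [hgx, hg x, pvStep_append (l + 1) (succ.getD x []) levels xs acc]
    have hrest : ∀ c ∈ xs,
        ((succ.getD x []).foldl (pvStep (l + 1)) (levels, acc)).1.contains c = true ∧
        ((succ.getD x []).foldl (pvStep (l + 1)) (levels, acc)).1.getD c 0 = l := by
      intro c hc
      obtain ⟨h1, h2⟩ := hinv c (List.mem_cons_of_mem _ hc)
      obtain ⟨h1', h2'⟩ := pvStep_preserve (l + 1) (succ.getD x []) levels acc c h1
      exact ⟨h1', by rw [h2']; exact h2⟩
    have := ih ((succ.getD x []).foldl (pvStep (l + 1)) (levels, acc)).2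
      ((succ.getD x []).foldl (pvStep (l + 1)) (levels, acc)).1 hrest
    simp only [Prod.mk.eta] at this
    rw [this]
    rfl

-- every node of the next frontier is present with value l + 1
theorem pvLayerFold_newinv (succ : PySem.Dict String (List String)) (l : Int) :
    ∀ (us : List String) (levels : PySem.Dict String Int) (q : List String),
    (∀ c ∈ q, levels.contains c = true ∧ levels.getD c 0 = l + 1) →
    ∀ c ∈ (pvLayerFold succ (l + 1) (levels, q) us).2,
      (pvLayerFold succ (l + 1) (levels, q) us).1.contains c = true ∧
        (pvLayerFold succ (l + 1) (levels, q) us).1.getD c 0 = l + 1 := by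
  intro us
  induction us with
  | nil => intro levels q hq; exact hq
  | cons u us ih =>
    intro levels q hq
    unfold pvLayerFold
    simp only [List.foldl_cons]
    have h1 := pvStep_newinv (l + 1) (succ.getD u []) levels q hq
    have := ih ((succ.getD u []).foldl (pvStep (l + 1)) (levels, q)).1
      ((succ.getD u []).foldl (pvStep (l + 1)) (levels, q)).2 h1
    simpa only [pvLayerFold, Prod.mk.eta] using this

-- queue BFS = layered BFS, whenever the whole frontier carries level l
theorem pvBfs_eq (graph succ : PySem.Dict String (List String))
    (hg : ∀ u, graph.getD u [] = succ.getD u []) :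
    ∀ (k : Nat) (levels : PySem.Dict String Int) (frontier : List String) (l : Int),
    frontier.length + 2 * pvFresh succ.values.flatten levels ≤ k →
    (∀ c ∈ frontier, levels.contains c = true ∧ levels.getD c 0 = l) →
    pvBfsA graph levels frontier = pvBfsB succ levels frontier l := by
  intro k
  induction k with
  | zero =>
    intro levels frontier l hk _
    have : frontier = [] := List.length_eq_zero_iff.mp (by omega)
    subst this
    rw [pvBfsA, pvBfsB]
    simp
  | succ k ih =>
    intro levels frontier l hk hinv
    cases hfr : frontier with
    | nil => rw [pvBfsA, pvBfsB]; simp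
    | cons x xs =>
      subst hfr
      have hstep : pvBfsA graph levels (x :: xs) =
          pvBfsA graph (pvLayerFold succ (l + 1) (levels, []) (x :: xs)).1
            (pvLayerFold succ (l + 1) (levels, []) (x :: xs)).2 := by
        have := pvQueue_layer graph succ hg l (x :: xs) [] levels hinv
        simpa using this
      have hmeas := pvLayer_le succ (l + 1) (x :: xs) levels []
      simp only [List.length_nil] at hmeas
      have hnewinv := pvLayerFold_newinv succ l (x :: xs) levels []
        (by intro c hc; simp at hc)
      have hih := ih (pvLayerFold succ (l + 1) (levels, []) (x :: xs)).1
        (pvLayerFold succ (l + 1) (levels, []) (x :: xs)).2 (l + 1)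
        (by simp only [List.length_cons] at hk; omega) hnewinv
      rw [hstep, hih]
      conv_rhs => rw [pvBfsB]
      simp only [List.cons_ne_nil, if_false]

-- A's single build loop over edges splits into three independent folds
theorem pvBuildA_split (edges : List (String × String)) :
    pvBuildA edges =
      (edges.foldl (fun g e => g.insert e.1 (g.getD e.1 [] ++ [e.2])) PySem.Dict.empty,
       edges.foldl (fun d e => d.insert e.2 (d.getD e.2 0 + 1)) PySem.Dict.empty,
       edges.foldl (fun s e => PySem.Set.add (PySem.Set.add s e.1) e.2) PySem.Set.empty) := by
  unfold pvBuildA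
  suffices h : ∀ (es : List (String × String)) (g : PySem.Dict String (List String))
      (d : PySem.Dict String Int) (s : PySem.Set String),
      es.foldl (fun st e =>
        (st.1.insert e.1 (st.1.getD e.1 [] ++ [e.2]),
         st.2.1.insert e.2 (st.2.1.getD e.2 0 + 1),
         PySem.Set.add (PySem.Set.add st.2.2 e.1) e.2)) (g, d, s) =
      (es.foldl (fun g e => g.insert e.1 (g.getD e.1 [] ++ [e.2])) g,
       es.foldl (fun d e => d.insert e.2 (d.getD e.2 0 + 1)) d,
       es.foldl (fun s e => PySem.Set.add (PySem.Set.add s e.1) e.2) s) by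
    exact h edges _ _ _
  intro es
  induction es with
  | nil => intro g d s; rfl
  | cons e es ih => intro g d s; simp only [List.foldl_cons]; exact ih _ _ _

-- "in_degree[w] == 0" is exactly "w not a target", i.e. B's set test
theorem pvCond_eq (edges : List (String × String)) (w : String) :
    ((edges.foldl (fun d e => d.insert e.2 (d.getD e.2 0 + 1))
        (PySem.Dict.empty : PySem.Dict String Int)).getD w 0 == 0)
      = !(PySem.Set.ofList (edges.map (·.2))).contains w := by
  have h1 : edges.foldl (fun d e => d.insert e.2 (d.getD e.2 0 + 1))
        (PySem.Dict.empty : PySem.Dict String Int)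
      = (edges.map (·.2)).foldl (fun d x => d.insert x (d.getD x 0 + 1)) PySem.Dict.empty := by
    rw [List.foldl_map]
  rw [h1, PySem.Dict.getD_foldl_insert_add_one (edges.map (·.2)) PySem.Dict.empty w,
    PySem.Dict.getD_empty]
  by_cases hm : w ∈ edges.map (·.2)
  · have hc : (PySem.Set.ofList (edges.map (·.2))).contains w = true := by
      rw [PySem.Set.contains_iff]
      exact (PySem.Set.mem_ofList _ _).mpr hm
    have hcnt : (edges.map (·.2)).count w ≠ 0 := by
      simpa [List.count_eq_zero] using hm
    rw [hc]
    simp only [Bool.not_true]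
    simp only [zero_add]
    simpa using fun h => hcnt (by exact_mod_cast h)
  · have hc : (PySem.Set.ofList (edges.map (·.2))).contains w = false := by
      simp only [Bool.eq_false_iff]
      intro hcc
      exact hm ((PySem.Set.mem_ofList _ _).mp ((PySem.Set.contains_iff _ _).mp hcc))
    have hcnt : (edges.map (·.2)).count w = 0 := List.count_eq_zero.mpr hm
    rw [hc, hcnt]
    simp

-- A's root loop (queue, dict) against B's dict comprehension + keys
theorem pvRoots_eq (c : String → Bool) :
    ∀ (ws : List String) (q : List String) (d : PySem.Dict String Int),
    ws.Nodup → q = d.keys → (∀ w ∈ ws, d.contains w = false) →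
    (ws.foldl (fun st w => if c w then (st.1 ++ [w], st.2.insert w 1) else st) (q, d)).1
        = (ws.foldl (fun dd w => if c w then dd.insert w 1 else dd) d).keys ∧
    (ws.foldl (fun st w => if c w then (st.1 ++ [w], st.2.insert w 1) else st) (q, d)).2
        = ws.foldl (fun dd w => if c w then dd.insert w 1 else dd) d := by
  intro ws
  induction ws with
  | nil => intro q d _ hq _; exact ⟨hq, rfl⟩
  | cons w ws ih =>
    intro q d hnd hq hfresh
    simp only [List.foldl_cons]
    have hndtail := hnd.of_cons
    have hwnotin : w ∉ ws := (List.nodup_cons.mp hnd).1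
    by_cases hc : c w = true
    · simp only [hc, if_true]
      refine ih (q ++ [w]) (d.insert w 1) hndtail ?_ ?_
      · rw [hq, PySem.Dict.keys_insert_of_not_contains _ _ (hfresh w List.mem_cons_self)]
      · intro x hx
        rw [PySem.Dict.contains_insert]
        have hne : x ≠ w := fun he => hwnotin (he ▸ hx)
        simp [hne, hfresh x (List.mem_cons_of_mem _ hx)]
    · simp only [hc, Bool.false_eq_true, if_false]
      exact ih q d hndtail hq (fun x hx => hfresh x (List.mem_cons_of_mem _ hx))

-- A's summation loop equals a sum of getD-with-default-(-1) (pointwise)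
theorem pvSum_eq (d : PySem.Dict String Int) :
    ∀ (q : List String) (t : Int),
    q.foldl (fun total w => if d.contains w then total + d.getD w 0 else total + (-1)) t
      = (q.map (fun w => d.getD w (-1))).foldl (· + ·) t := by
  intro q
  induction q with
  | nil => intro t; rfl
  | cons w q ih =>
    intro t
    simp only [List.foldl_cons, List.map_cons]
    have hpt : (if d.contains w = true then t + d.getD w 0 else t + (-1)) = t + d.getD w (-1) := by
      by_cases hc : d.contains w = true
      · obtain ⟨v, hg⟩ : ∃ v, d.get? w = some v := by
          rw [PySem.Dict.contains_eq_isSome_get?] at hc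
          exact Option.isSome_iff_exists.mp hc
        rw [if_pos hc, PySem.Dict.getD_of_get?_eq_some _ _ hg,
          PySem.Dict.getD_of_get?_eq_some _ _ hg]
      · have hcf : d.contains w = false := by simpa using hc
        rw [if_neg hc, PySem.Dict.getD_of_not_contains _ _ hcf]
    rw [hpt, ih]

-- ---- new machinery: the relaxation rounds against the layered BFS ----

-- the all-words set: membership and nodup
theorem pvWords_mem (edges : List (String × String)) (w : String) :
    w ∈ edges.foldl (fun s e => PySem.Set.add (PySem.Set.add s e.1) e.2) PySem.Set.empty ↔
      ∃ e ∈ edges, w = e.1 ∨ w = e.2 := by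
  suffices h : ∀ (es : List (String × String)) (s : PySem.Set String),
      w ∈ es.foldl (fun s e => PySem.Set.add (PySem.Set.add s e.1) e.2) s ↔
        w ∈ s ∨ ∃ e ∈ es, w = e.1 ∨ w = e.2 by
    rw [h]; simp [PySem.Set.empty]
  intro es
  induction es with
  | nil => intro s; simp
  | cons e es ih =>
    intro s
    simp only [List.foldl_cons, ih, PySem.Set.mem_add, List.mem_cons]
    constructor
    · rintro (((h | h) | h) | ⟨e', he', h⟩)
      · exact Or.inl h
      · exact Or.inr ⟨e, Or.inl rfl, Or.inl h⟩
      · exact Or.inr ⟨e, Or.inl rfl, Or.inr h⟩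
      · exact Or.inr ⟨e', Or.inr he', h⟩
    · rintro (h | ⟨e', (rfl | he'), h⟩)
      · exact Or.inl (Or.inl (Or.inl h))
      · rcases h with h | h
        · exact Or.inl (Or.inl (Or.inr h))
        · exact Or.inl (Or.inr h)
      · exact Or.inr ⟨e', he', h⟩

theorem pvWords_nodup (edges : List (String × String)) :
    (edges.foldl (fun s e => PySem.Set.add (PySem.Set.add s e.1) e.2) PySem.Set.empty).Nodup := by
  suffices h : ∀ (es : List (String × String)) (s : PySem.Set String), s.Nodup →
      (es.foldl (fun s e => PySem.Set.add (PySem.Set.add s e.1) e.2) s).Nodup by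
    exact h edges _ List.nodup_nil
  intro es
  induction es with
  | nil => intro s hs; exact hs
  | cons e es ih =>
    intro s hs
    exact ih _ (PySem.Set.nodup_add _ _ (PySem.Set.nodup_add _ _ hs))

theorem pvGraph_mem (edges : List (String × String)) (a b : String) :
    b ∈ (edges.foldl (fun g e => g.insert e.1 (g.getD e.1 [] ++ [e.2]))
        (PySem.Dict.empty : PySem.Dict String (List String))).getD a [] ↔ (a, b) ∈ edges := by
  have h : edges.foldl (fun (g : PySem.Dict String (List String)) e => g.insert e.1 (g.getD e.1 [] ++ [e.2])) PySem.Dict.empty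
      = edges.foldl (fun (g : PySem.Dict String (List String)) e => g.modify e.1 [] (· ++ [e.2])) PySem.Dict.empty := rfl
  rw [h]
  have h2 := PySem.Dict.getD_foldl_modify_append edges (PySem.Dict.empty : PySem.Dict String (List String)) a
  rw [h2]
  simp only [PySem.Dict.getD_empty, List.nil_append, List.mem_map, List.mem_filter]
  constructor
  · rintro ⟨e, ⟨he, heq⟩, rfl⟩
    have : e.1 = a := by simpa using heq
    exact this ▸ he
  · intro h
    exact ⟨(a, b), ⟨h, by simp⟩, rfl⟩

theorem pvDictEq_iff (d1 d2 : PySem.Dict String Int)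
    (h1 : d1.keys.Nodup) (h2 : d2.keys.Nodup) :
    pvDictEq d1 d2 = true ↔ pvPtEq d1 d2 := by
  unfold pvDictEq pvPtEq
  rw [Bool.and_eq_true, List.all_eq_true, List.all_eq_true]
  constructor
  · rintro ⟨ha, hb⟩ w
    cases hc1 : d1.get? w with
    | some v =>
      have hm := PySem.Dict.mem_items_of_get?_eq_some d1 hc1
      have := ha _ hm
      exact (beq_iff_eq.mp this).symm
    | none =>
      cases hc2 : d2.get? w with
      | some v =>
        have hm := PySem.Dict.mem_items_of_get?_eq_some d2 hc2
        have := hb _ hm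
        rw [hc1] at this
        simp at this
      | none => rfl
  · intro h
    constructor
    · rintro ⟨k, v⟩ hm
      have := PySem.Dict.get?_of_mem_items d1 hm h1
      simp only [← h k, this, beq_iff_eq]
    · rintro ⟨k, v⟩ hm
      have := PySem.Dict.get?_of_mem_items d2 hm h2
      simp only [h k, this, beq_iff_eq]

theorem pvRelax_congr (edges : List (String × String)) (o1 o2 : PySem.Dict String Int)
    (h : pvPtEq o1 o2) : pvPtEq (pvRelax edges o1) (pvRelax edges o2) := by
  have hc : ∀ w, o1.contains w = o2.contains w := by
    intro w; rw [PySem.Dict.contains_eq_isSome_get?, PySem.Dict.contains_eq_isSome_get?, h w]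
  have hg : ∀ w, o1.getD w 0 = o2.getD w 0 := by
    intro w; rw [PySem.Dict.getD_eq_get?_getD, PySem.Dict.getD_eq_get?_getD, h w]
  unfold pvRelax
  suffices hs : ∀ (es : List (String × String)) (n1 n2 : PySem.Dict String Int),
      pvPtEq n1 n2 →
      pvPtEq (es.foldl (fun new e =>
        if o1.contains e.1 && (!(new.contains e.2) || o1.getD e.1 0 + 1 < new.getD e.2 0)
        then new.insert e.2 (o1.getD e.1 0 + 1) else new) n1)
        (es.foldl (fun new e =>
          if o2.contains e.1 && (!(new.contains e.2) || o2.getD e.1 0 + 1 < new.getD e.2 0)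
          then new.insert e.2 (o2.getD e.1 0 + 1) else new) n2) from
    hs edges o1 o2 h
  intro es
  induction es with
  | nil => intro n1 n2 hn; exact hn
  | cons e es ih =>
    intro n1 n2 hn
    simp only [List.foldl_cons]
    have hnc : ∀ w, n1.contains w = n2.contains w := by
      intro w; rw [PySem.Dict.contains_eq_isSome_get?, PySem.Dict.contains_eq_isSome_get?, hn w]
    have hng : ∀ w, n1.getD w 0 = n2.getD w 0 := by
      intro w; rw [PySem.Dict.getD_eq_get?_getD, PySem.Dict.getD_eq_get?_getD, hn w]
    rw [hc e.1, hg e.1, hnc e.2, hng e.2]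
    by_cases hcond : (o2.contains e.1 &&
        (!(n2.contains e.2) || o2.getD e.1 0 + 1 < n2.getD e.2 0)) = true
    · rw [if_pos hcond, if_pos hcond]
      refine ih _ _ ?_
      intro w
      rw [PySem.Dict.get?_insert, PySem.Dict.get?_insert]
      split
      · rfl
      · exact hn w
    · rw [if_neg hcond, if_neg hcond]
      exact ih _ _ hn

theorem pvRelax_nodup (edges : List (String × String)) (d : PySem.Dict String Int)
    (h : d.keys.Nodup) : (pvRelax edges d).keys.Nodup := by
  unfold pvRelax
  suffices hs : ∀ (es : List (String × String)) (n : PySem.Dict String Int),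
      n.keys.Nodup →
      (es.foldl (fun new e =>
        if d.contains e.1 && (!(new.contains e.2) || d.getD e.1 0 + 1 < new.getD e.2 0)
        then new.insert e.2 (d.getD e.1 0 + 1) else new) n).keys.Nodup from hs edges d h
  intro es
  induction es with
  | nil => intro n hn; exact hn
  | cons e es ih =>
    intro n hn
    simp only [List.foldl_cons]
    split
    · exact ih _ (PySem.Dict.nodup_keys_insert _ _ _ hn)
    · exact ih _ hn

theorem pvStep_get? (v : Int) :
    ∀ (ns : List String) (L : PySem.Dict String Int) (q : List String) (w : String),
    (ns.foldl (pvStep v) (L, q)).1.get? w =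
      if L.contains w then L.get? w
      else if ns.contains w then some v else none := by
  intro ns
  induction ns with
  | nil =>
    intro L q w
    simp only [List.foldl_nil]
    split
    · rfl
    · rename_i hc
      rw [(PySem.Dict.get?_eq_none_iff_contains L w).mpr (by simpa using hc)]
      simp
  | cons nb ns ih =>
    intro L q w
    simp only [List.foldl_cons, pvStep]
    by_cases h : L.contains nb = true
    · simp only [h, if_true]
      rw [ih]
      by_cases hw : L.contains w = true
      · simp [hw]
      · have hne : w ≠ nb := fun he => hw (he ▸ h)
        simp [hw, hne]
    · simp only [h, Bool.false_eq_true, if_false]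
      rw [ih]
      by_cases hw : w = nb
      · subst hw
        simp [PySem.Dict.contains_insert_self, PySem.Dict.get?_insert_self, h]
      · have hci : (L.insert nb v).contains w = L.contains w := by
          rw [PySem.Dict.contains_insert]
          simp [hw]
        rw [hci, PySem.Dict.get?_insert_of_ne _ _ hw]
        simp [hw]

theorem pvStep_keys (v : Int) :
    ∀ (ns : List String) (L : PySem.Dict String Int) (q : List String),
    ∃ t, (ns.foldl (pvStep v) (L, q)).2 = q ++ t ∧
      (ns.foldl (pvStep v) (L, q)).1.keys = L.keys ++ t ∧
      (L.keys.Nodup → (ns.foldl (pvStep v) (L, q)).1.keys.Nodup) := by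
  intro ns
  induction ns with
  | nil => intro L q; exact ⟨[], by simp, by simp, fun h => h⟩
  | cons nb ns ih =>
    intro L q
    simp only [List.foldl_cons, pvStep]
    by_cases h : L.contains nb = true
    · simp only [h, if_true]
      exact ih L q
    · simp only [h, Bool.false_eq_true, if_false]
      obtain ⟨t, h1, h2, h3⟩ := ih (L.insert nb v) (q ++ [nb])
      have hk : (L.insert nb v).keys = L.keys ++ [nb] :=
        PySem.Dict.keys_insert_of_not_contains _ _ (by simpa using h)
      refine ⟨nb :: t, by simpa using h1, by rw [h2, hk]; simp, fun hnd => ?_⟩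
      refine h3 ?_
      rw [hk]
      have hnm : nb ∉ L.keys := by
        intro hm
        exact absurd ((PySem.Dict.contains_iff_mem_keys L nb).mpr hm) h
      exact hnd.append (List.nodup_singleton _) (by simpa [List.disjoint_singleton] using hnm)

theorem pvLayer_get? (graph : PySem.Dict String (List String)) (v : Int) :
    ∀ (F : List String) (L : PySem.Dict String Int) (q : List String) (w : String),
    (pvLayerFold graph v (L, q) F).1.get? w =
      if L.contains w then L.get? w
      else if F.any (fun u => (graph.getD u []).contains w) then some v else none := by
  intro F
  induction F with
  | nil =>
    intro L q w
    simp only [pvLayerFold, List.foldl_nil, List.any_nil]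
    split
    · rfl
    · rename_i hc
      rw [(PySem.Dict.get?_eq_none_iff_contains L w).mpr (by simpa using hc)]
      simp
  | cons u F ih =>
    intro L q w
    have hfold : pvLayerFold graph v (L, q) (u :: F)
        = pvLayerFold graph v ((graph.getD u []).foldl (pvStep v) (L, q)) F := by
      simp [pvLayerFold]
    set st := (graph.getD u []).foldl (pvStep v) (L, q) with hst
    have hdesc : ∀ x, st.1.get? x =
        if L.contains x then L.get? x
        else if (graph.getD u []).contains x then some v else none := by
      intro x
      rw [hst]
      have := pvStep_get? v (graph.getD u []) L q x
      simpa using this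
    have hfold2 : pvLayerFold graph v st F = pvLayerFold graph v (st.1, st.2) F := by simp
    rw [hfold, hfold2, ih st.1 st.2 w]
    by_cases hL : L.contains w = true
    · have h1 : st.1.get? w = L.get? w := by rw [hdesc w, if_pos hL]
      have hc1 : st.1.contains w = true := by
        rw [PySem.Dict.contains_eq_isSome_get?, h1, ← PySem.Dict.contains_eq_isSome_get?]
        exact hL
      simp only [hc1, hL, if_true]
      exact h1
    · have hLf : L.contains w = false := by simpa using hL
      by_cases hns : (graph.getD u []).contains w = true
      · have h1 : st.1.get? w = some v := by rw [hdesc w, if_neg hL, if_pos hns]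
        have hc1 : st.1.contains w = true := by
          rw [PySem.Dict.contains_eq_isSome_get?, h1]; rfl
        simp only [hc1, hLf, hns, List.any_cons, Bool.true_or, if_true, Bool.false_eq_true,
          if_false]
        exact h1
      · have h1 : st.1.get? w = none := by
          rw [hdesc w, if_neg hL, if_neg hns]
        have hc1 : st.1.contains w = false := by
          rw [PySem.Dict.contains_eq_isSome_get?, h1]; rfl
        have hnsf : (graph.getD u []).contains w = false := by simpa using hns
        simp only [hc1, hLf, hnsf, List.any_cons, Bool.false_or, Bool.false_eq_true, if_false]

theorem pvLayer_keys (graph : PySem.Dict String (List String)) (v : Int) :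
    ∀ (F : List String) (L : PySem.Dict String Int) (q : List String),
    ∃ t, (pvLayerFold graph v (L, q) F).2 = q ++ t ∧
      (pvLayerFold graph v (L, q) F).1.keys = L.keys ++ t ∧
      (L.keys.Nodup → (pvLayerFold graph v (L, q) F).1.keys.Nodup) := by
  intro F
  induction F with
  | nil => intro L q; exact ⟨[], by simp [pvLayerFold], by simp [pvLayerFold], fun h => h⟩
  | cons u F ih =>
    intro L q
    have hfold : pvLayerFold graph v (L, q) (u :: F)
        = pvLayerFold graph v (((graph.getD u []).foldl (pvStep v) (L, q)).1,
            ((graph.getD u []).foldl (pvStep v) (L, q)).2) F := by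
      simp [pvLayerFold]
    obtain ⟨t1, i1, i2, i3⟩ := pvStep_keys v (graph.getD u []) L q
    obtain ⟨t2, j1, j2, j3⟩ := ih ((graph.getD u []).foldl (pvStep v) (L, q)).1
      ((graph.getD u []).foldl (pvStep v) (L, q)).2
    refine ⟨t1 ++ t2, ?_, ?_, ?_⟩
    · rw [hfold, j1, i1, List.append_assoc]
    · rw [hfold, j2, i2, List.append_assoc]
    · intro hnd
      rw [hfold]
      exact j3 (i3 hnd)

def pvInv (edges : List (String × String)) (wordsL : List String) (k : Nat)
    (L : PySem.Dict String Int) (F : List String) : Prop :=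
  (∀ w v, L.get? w = some v → v ≤ (k : Int) + 1) ∧
  (∀ w, w ∈ F ↔ L.get? w = some ((k : Int) + 1)) ∧
  (∀ a b va, (a, b) ∈ edges → L.get? a = some va → va ≤ (k : Int) →
    ∃ vb, L.get? b = some vb ∧ vb ≤ va + 1) ∧
  (∀ w ∈ L.keys, w ∈ wordsL) ∧ L.keys.Nodup

-- description of one relaxation round, pointwise, under the invariant
theorem pvRelaxFold_desc (edges : List (String × String)) (wordsL : List String) (k : Nat)
    (L : PySem.Dict String Int) (F : List String) (hInv : pvInv edges wordsL k L F) :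
    ∀ (es : List (String × String)) (P : String → Bool) (new : PySem.Dict String Int),
    (∀ e ∈ es, e ∈ edges) →
    (∀ x, new.get? x = if L.contains x then L.get? x
      else if P x then some ((k : Int) + 2) else none) →
    ∀ w, (es.foldl (fun new e =>
        if L.contains e.1 && (!(new.contains e.2) || L.getD e.1 0 + 1 < new.getD e.2 0)
        then new.insert e.2 (L.getD e.1 0 + 1) else new) new).get? w =
      if L.contains w then L.get? w
      else if (P w || es.any (fun e => e.2 == w && (L.get? e.1 == some ((k : Int) + 1))))
        then some ((k : Int) + 2) else none := by
  obtain ⟨hI1, _hI2, hI3, _⟩ := hInv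
  intro es
  induction es with
  | nil =>
    intro P new _ hdesc w
    simpa using hdesc w
  | cons e es ih =>
    intro P new hsub hdesc w
    simp only [List.foldl_cons]
    have hmem : e ∈ edges := hsub e List.mem_cons_self
    set P' : String → Bool :=
      fun x => P x || (e.2 == x && (L.get? e.1 == some ((k : Int) + 1))) with hP'
    -- the one-edge step keeps the description, with P advanced to P'
    have hstep : ∀ x,
        (if L.contains e.1 && (!(new.contains e.2) || L.getD e.1 0 + 1 < new.getD e.2 0)
         then new.insert e.2 (L.getD e.1 0 + 1) else new).get? x =
        if L.contains x then L.get? x else if P' x then some ((k : Int) + 2) else none := by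
      intro x
      cases hA : L.get? e.1 with
      | none =>
        have hca : L.contains e.1 = false := by
          rw [PySem.Dict.contains_eq_isSome_get?, hA]; rfl
        simp only [hca, Bool.false_and, Bool.false_eq_true, if_false]
        rw [hdesc x]
        rcases eq_or_ne e.2 x with rfl | hne
        · simp [hP', hA]
        · simp [hP', hne]
      | some va =>
        have hca : L.contains e.1 = true := by
          rw [PySem.Dict.contains_eq_isSome_get?, hA]; rfl
        have hgda : L.getD e.1 0 = va := PySem.Dict.getD_of_get?_eq_some _ _ hA
        have hva : va ≤ (k : Int) + 1 := hI1 _ _ hA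
        cases hB : L.get? e.2 with
        | some vb =>
          have hcb : L.contains e.2 = true := by
            rw [PySem.Dict.contains_eq_isSome_get?, hB]; rfl
          have hnb : new.get? e.2 = some vb := by rw [hdesc e.2, if_pos hcb, hB]
          have hncb : new.contains e.2 = true := by
            rw [PySem.Dict.contains_eq_isSome_get?, hnb]; rfl
          have hngd : new.getD e.2 0 = vb := PySem.Dict.getD_of_get?_eq_some _ _ hnb
          have hnlt : ¬(va + 1 < vb) := by
            intro hlt
            have hvb : vb ≤ (k : Int) + 1 := hI1 _ _ hB
            have hva' : va ≤ (k : Int) := by omega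
            obtain ⟨vb', hvb', hle⟩ := hI3 e.1 e.2 va hmem hA hva'
            rw [hB] at hvb'
            cases hvb'
            omega
          have hcond : (L.contains e.1 &&
              (!(new.contains e.2) || L.getD e.1 0 + 1 < new.getD e.2 0)) = false := by
            rw [hca, hncb, hgda, hngd]
            simp [hnlt]
          rw [hcond]
          simp only [Bool.false_eq_true, if_false]
          rw [hdesc x]
          rcases eq_or_ne e.2 x with rfl | hne
          · simp [hcb]
          · simp [hP', hne]
        | none =>
          have hcb : L.contains e.2 = false := by
            rw [PySem.Dict.contains_eq_isSome_get?, hB]; rfl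
          -- a's value is forced to k+1
          have hvaeq : va = (k : Int) + 1 := by
            by_contra hne
            have hva' : va ≤ (k : Int) := by omega
            obtain ⟨vb, hvb, _⟩ := hI3 e.1 e.2 va hmem hA hva'
            rw [hB] at hvb
            cases hvb
          have hterm : (L.get? e.1 == some ((k : Int) + 1)) = true := by
            rw [hA, hvaeq]; simp
          cases hPb : P e.2 with
          | true =>
            have hnb : new.get? e.2 = some ((k : Int) + 2) := by
              rw [hdesc e.2, if_neg (by simp [hcb]), hPb]; rfl
            have hncb : new.contains e.2 = true := by
              rw [PySem.Dict.contains_eq_isSome_get?, hnb]; rfl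
            have hngd : new.getD e.2 0 = (k : Int) + 2 :=
              PySem.Dict.getD_of_get?_eq_some _ _ hnb
            have hcond : (L.contains e.1 &&
                (!(new.contains e.2) || L.getD e.1 0 + 1 < new.getD e.2 0)) = false := by
              rw [hca, hncb, hgda, hngd, hvaeq]
              simp
              omega
            rw [hcond]
            simp only [Bool.false_eq_true, if_false]
            rw [hdesc x]
            rcases eq_or_ne e.2 x with rfl | hne
            · simp [hcb, hP', hPb]
            · simp [hP', hne]
          | false =>
            have hnb : new.get? e.2 = none := by
              rw [hdesc e.2, if_neg (by simp [hcb]), hPb]; rfl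
            have hncb : new.contains e.2 = false := by
              rw [PySem.Dict.contains_eq_isSome_get?, hnb]; rfl
            have hcond : (L.contains e.1 &&
                (!(new.contains e.2) || L.getD e.1 0 + 1 < new.getD e.2 0)) = true := by
              rw [hca, hncb]
              simp
            rw [hcond]
            simp only [if_true]
            rw [PySem.Dict.get?_insert]
            rcases eq_or_ne x e.2 with rfl | hne
            · have hP'b : P' e.2 = true := by
                rw [hP']
                simp [hterm]
              rw [if_pos rfl, hgda, hvaeq, if_neg (show ¬ L.contains e.2 = true by simp [hcb]),
                if_pos hP'b]
              congr 1
            · rw [if_neg hne, hdesc x]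
              rcases eq_or_ne (P x) (P' x) with hPP | hPP
              · rw [hPP]
              · exfalso
                apply hPP
                simp [hP', Ne.symm hne]
    have := ih P' _ (fun e' he' => hsub e' (List.mem_cons_of_mem _ he')) hstep w
    rw [this]
    by_cases hLw : L.contains w = true
    · simp [hLw]
    · have hLwf : L.contains w = false := by simpa using hLw
      simp only [hLwf, Bool.false_eq_true, if_false, List.any_cons, hP']
      rw [Bool.or_assoc]
      rfl

theorem pvRelax_get? (edges : List (String × String)) (wordsL : List String) (k : Nat)
    (L : PySem.Dict String Int) (F : List String) (hInv : pvInv edges wordsL k L F) (w : String) :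
    (pvRelax edges L).get? w =
      if L.contains w then L.get? w
      else if edges.any (fun e => e.2 == w && (L.get? e.1 == some ((k : Int) + 1)))
        then some ((k : Int) + 2) else none := by
  have hbase : ∀ x, L.get? x = if L.contains x then L.get? x
      else if (fun _ => false) x then some ((k : Int) + 2) else none := by
    intro x
    by_cases hc : L.contains x = true
    · rw [if_pos hc]
    · rw [if_neg hc, (PySem.Dict.get?_eq_none_iff_contains L x).mpr (by simpa using hc)]
      simp
  have := pvRelaxFold_desc edges wordsL k L F hInv edges (fun _ => false) L
    (fun _ he => he) hbase w
  unfold pvRelax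
  rw [this]
  rw [Bool.false_or]

theorem pvRound (edges : List (String × String)) (wordsL : List String) (k : Nat)
    (L : PySem.Dict String Int) (F : List String)
    (graph : PySem.Dict String (List String))
    (hgraph : graph = edges.foldl (fun g e => g.insert e.1 (g.getD e.1 [] ++ [e.2])) PySem.Dict.empty)
    (hwords : wordsL = edges.foldl (fun s e => PySem.Set.add (PySem.Set.add s e.1) e.2) PySem.Set.empty)
    (hInv : pvInv edges wordsL k L F) :
    pvPtEq (pvRelax edges L) (pvLayerFold graph ((k : Int) + 2) (L, []) F).1 ∧
    pvInv edges wordsL (k + 1) (pvLayerFold graph ((k : Int) + 2) (L, []) F).1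
      (pvLayerFold graph ((k : Int) + 2) (L, []) F).2 ∧
    (pvLayerFold graph ((k : Int) + 2) (L, []) F).1.keys
      = L.keys ++ (pvLayerFold graph ((k : Int) + 2) (L, []) F).2 := by
  obtain ⟨hI1, hI2, hI3, hI4, hI5⟩ := hInv
  set L1 := (pvLayerFold graph ((k : Int) + 2) (L, []) F).1 with hL1
  set F1 := (pvLayerFold graph ((k : Int) + 2) (L, []) F).2 with hF1
  -- the two Bool conditions agree
  have hcond : ∀ w, (F.any fun u => (graph.getD u []).contains w)
      = (edges.any fun e => e.2 == w && (L.get? e.1 == some ((k : Int) + 1))) := by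
    intro w
    rcases hb1 : F.any fun u => (graph.getD u []).contains w with _ | _
    · rcases hb2 : edges.any fun e => e.2 == w && (L.get? e.1 == some ((k : Int) + 1)) with _ | _
      · rfl
      · exfalso
        obtain ⟨e, he, hh⟩ := List.any_eq_true.mp hb2
        rw [Bool.and_eq_true, beq_iff_eq, beq_iff_eq] at hh
        obtain ⟨hew, hev⟩ := hh
        have hmemF : e.1 ∈ F := (hI2 e.1).mpr hev
        have hmemg : w ∈ graph.getD e.1 [] := by
          rw [hgraph, pvGraph_mem]
          have h' : (e.1, e.2) ∈ edges := by simpa using he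
          rw [hew] at h'
          exact h'
        have : (F.any fun u => (graph.getD u []).contains w) = true :=
          List.any_eq_true.mpr ⟨e.1, hmemF, by simpa using hmemg⟩
        rw [hb1] at this
        exact Bool.false_ne_true this
    · obtain ⟨u, hu, hh⟩ := List.any_eq_true.mp hb1
      have hmemg : (u, w) ∈ edges := by
        rw [← pvGraph_mem edges u w, ← hgraph]
        simpa using hh
      have hval : L.get? u = some ((k : Int) + 1) := (hI2 u).mp hu
      symm
      exact List.any_eq_true.mpr ⟨(u, w), hmemg, by simp [hval]⟩
  have hdesc : ∀ w, L1.get? w =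
      if L.contains w then L.get? w
      else if F.any (fun u => (graph.getD u []).contains w) then some ((k : Int) + 2) else none := by
    intro w
    rw [hL1, pvLayer_get?]
  obtain ⟨t, ht1, ht2, ht3⟩ := pvLayer_keys graph ((k : Int) + 2) F L []
  rw [List.nil_append] at ht1
  rw [← hF1] at ht1
  rw [← hL1] at ht2 ht3
  subst ht1
  have hkeys : L1.keys = L.keys ++ F1 := ht2
  have hnd1 : L1.keys.Nodup := ht3 hI5
  have hdisj : ∀ w ∈ F1, w ∉ L.keys := by
    rw [hkeys] at hnd1
    intro w hw hmem
    exact (List.disjoint_of_nodup_append hnd1) hmem hw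
  have hcast : ((k + 1 : Nat) : Int) = (k : Int) + 1 := by push_cast; ring
  -- I2'
  have hI2' : ∀ w, w ∈ F1 ↔ L1.get? w = some ((k : Int) + 2) := by
    intro w
    constructor
    · intro hw
      have hmem1 : w ∈ L1.keys := hkeys ▸ List.mem_append_right _ hw
      have hc1 : L1.contains w = true := (PySem.Dict.contains_iff_mem_keys _ _).mpr hmem1
      have hcL : L.contains w = false := by
        rcases hb : L.contains w with _ | _
        · rfl
        · exact absurd ((PySem.Dict.contains_iff_mem_keys _ _).mp hb) (hdisj w hw)
      have hgw := hdesc w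
      rw [hcL] at hgw
      simp only [Bool.false_eq_true, if_false] at hgw
      rcases hb : F.any fun u => (graph.getD u []).contains w with _ | _
      · rw [hb] at hgw
        simp only [Bool.false_eq_true, if_false] at hgw
        rw [PySem.Dict.contains_eq_isSome_get?, hgw] at hc1
        cases hc1
      · rw [hb] at hgw
        simpa using hgw
    · intro hw
      have hcL : L.contains w = false := by
        rcases hb : L.contains w with _ | _
        · rfl
        · exfalso
          have := hdesc w
          rw [hw, hb, if_pos rfl] at this
          have := hI1 w _ this.symm
          omega
      have hc1 : L1.contains w = true := by
        rw [PySem.Dict.contains_eq_isSome_get?, hw]; rfl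
      have hmem1 : w ∈ L1.keys := (PySem.Dict.contains_iff_mem_keys _ _).mp hc1
      rw [hkeys] at hmem1
      rcases List.mem_append.mp hmem1 with hm | hm
      · exfalso
        have := (PySem.Dict.contains_iff_mem_keys L w).mpr hm
        rw [hcL] at this
        exact Bool.false_ne_true this
      · exact hm
  refine ⟨?_, ⟨?_, ?_, ?_, ?_, hnd1⟩, hkeys⟩
  -- pointwise equality of the relax round and the layer round
  · intro w
    rw [pvRelax_get? edges wordsL k L F ⟨hI1, hI2, hI3, hI4, hI5⟩ w, hdesc w, hcond w]
  -- I1'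
  · intro w v hv
    rw [hcast]
    rw [hdesc w] at hv
    split at hv
    · have := hI1 w v hv
      omega
    · split at hv
      · cases hv; omega
      · cases hv
  -- I2' (with the cast)
  · intro w
    rw [hcast]
    exact hI2' w
  -- I3'
  · intro a b va hab ha hva
    rw [hcast] at hva
    have hda := hdesc a
    rw [ha] at hda
    by_cases hcLa : L.contains a = true
    · rw [if_pos hcLa] at hda
      by_cases hvak : va ≤ (k : Int)
      · obtain ⟨vb, hvb, hle⟩ := hI3 a b va hab hda.symm hvak
        have hcLb : L.contains b = true := by
          rw [PySem.Dict.contains_eq_isSome_get?, hvb]; rfl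
        refine ⟨vb, ?_, hle⟩
        rw [hdesc b, if_pos hcLb, hvb]
      · have hvaeq : va = (k : Int) + 1 := by
          have := hI1 a va hda.symm
          omega
        have haF : a ∈ F := (hI2 a).mpr (by rw [← hvaeq]; exact hda.symm)
        have hbany : (F.any fun u => (graph.getD u []).contains b) = true := by
          refine List.any_eq_true.mpr ⟨a, haF, ?_⟩
          have : b ∈ graph.getD a [] := by rw [hgraph, pvGraph_mem]; exact hab
          simpa using this
        by_cases hcLb : L.contains b = true
        · obtain ⟨vb, hvb⟩ : ∃ vb, L.get? b = some vb := by
            rw [PySem.Dict.contains_eq_isSome_get?] at hcLb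
            exact Option.isSome_iff_exists.mp hcLb
          refine ⟨vb, ?_, ?_⟩
          · rw [hdesc b, if_pos hcLb, hvb]
          · have := hI1 b vb hvb
            omega
        · refine ⟨(k : Int) + 2, ?_, by omega⟩
          rw [hdesc b, if_neg hcLb, hbany]
          rfl
    · rw [if_neg hcLa] at hda
      split at hda
      · exfalso
        cases hda
        omega
      · cases hda
  -- I4'
  · intro w hw
    rw [hkeys] at hw
    rcases List.mem_append.mp hw with hm | hm
    · exact hI4 w hm
    · have := (hI2' w).mp hm
      have hcL : L.contains w = false := by
        rcases hb : L.contains w with _ | _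
        · rfl
        · exfalso
          have hd := hdesc w
          rw [this, hb, if_pos rfl] at hd
          have := hI1 w _ hd.symm
          omega
      have hd := hdesc w
      rw [this, hcL] at hd
      simp only [Bool.false_eq_true, if_false] at hd
      rcases hb : F.any fun u => (graph.getD u []).contains w with _ | _
      · rw [hb] at hd; cases hd
      · obtain ⟨u, hu, hh⟩ := List.any_eq_true.mp hb
        have hmemg : (u, w) ∈ edges := by
          rw [← pvGraph_mem edges u w, ← hgraph]
          simpa using hh
        rw [hwords, pvWords_mem]
        exact ⟨(u, w), hmemg, Or.inr rfl⟩

theorem pvRELB (edges : List (String × String)) (wordsL : List String)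
    (graph : PySem.Dict String (List String))
    (hgraph : graph = edges.foldl (fun g e => g.insert e.1 (g.getD e.1 [] ++ [e.2])) PySem.Dict.empty)
    (hwords : wordsL = edges.foldl (fun s e => PySem.Set.add (PySem.Set.add s e.1) e.2) PySem.Set.empty) :
    ∀ (j : Nat) (R L : PySem.Dict String Int) (F : List String) (k : Nat),
    pvInv edges wordsL k L F → pvPtEq R L → R.keys.Nodup →
    (F = [] ∨ wordsL.length < L.keys.length + j) →
    pvPtEq (pvIterRelax edges j R) (pvBfsB graph L F ((k : Int) + 1)) := by
  intro j
  induction j with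
  | zero =>
    intro R L F k hInv hpt hnd hside
    have hkle : L.keys.length ≤ wordsL.length :=
      (List.subperm_of_subset hInv.2.2.2.2 (fun w hw => hInv.2.2.2.1 w hw)).length_le
    have hF : F = [] := by
      rcases hside with h | h
      · exact h
      · omega
    subst hF
    rw [pvBfsB]
    simp only [if_true]
    exact hpt
  | succ j ih =>
    intro R L F k hInv hpt hnd hside
    obtain ⟨hptRound, hInv', hkeys⟩ := pvRound edges wordsL k L F graph hgraph hwords hInv
    set L1 := (pvLayerFold graph ((k : Int) + 2) (L, []) F).1 with hL1
    set F1 := (pvLayerFold graph ((k : Int) + 2) (L, []) F).2 with hF1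
    have hptnew : pvPtEq (pvRelax edges R) L1 :=
      fun w => (pvRelax_congr edges R L hpt w).trans (hptRound w)
    have hndnew : (pvRelax edges R).keys.Nodup := pvRelax_nodup edges R hnd
    have hcast : ((k : Int) + 1) + 1 = (k : Int) + 2 := by ring
    have hcast2 : (((k + 1 : Nat) : Int)) + 1 = (k : Int) + 2 := by push_cast; ring
    simp only [pvIterRelax]
    by_cases hEq : pvDictEq (pvRelax edges R) R = true
    · rw [if_pos hEq]
      have hptRR : pvPtEq (pvRelax edges R) R := (pvDictEq_iff _ _ hndnew hnd).mp hEq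
      have hptL1L : pvPtEq L1 L :=
        fun w => ((hptnew w).symm.trans (hptRR w)).trans (hpt w)
      have hF1nil : F1 = [] := by
        cases hF1c : F1 with
        | nil => rfl
        | cons x xs =>
          exfalso
          have hx : x ∈ F1 := by rw [hF1c]; exact List.mem_cons_self
          have hval := (hInv'.2.1 x).mp hx
          have hvalL : L.get? x = some (((k + 1 : Nat) : Int) + 1) := by
            rw [← hptL1L x]; exact hval
          have := hInv.1 x _ hvalL
          push_cast at this
          omega
      by_cases hFnil : F = []
      · subst hFnil
        rw [pvBfsB]
        simp only [if_true]
        exact hpt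
      · rw [pvBfsB, if_neg hFnil]
        simp only [hcast, ← hL1, ← hF1]
        rw [pvBfsB, if_pos hF1nil]
        exact fun w => (hptRR w).symm.trans (hptnew w)
    · rw [if_neg hEq]
      have hFne : F ≠ [] := by
        intro hF
        apply hEq
        refine (pvDictEq_iff _ _ hndnew hnd).mpr ?_
        have hL1L : L1 = L := by rw [hL1, hF]; rfl
        intro w
        exact (hptnew w).trans (hL1L ▸ (hpt w).symm)
      have hlt : wordsL.length < L.keys.length + (j + 1) := by
        rcases hside with h | h
        · exact absurd h hFne
        · exact h
      have hside' : F1 = [] ∨ wordsL.length < L1.keys.length + j := by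
        by_cases hF1c : F1 = []
        · exact Or.inl hF1c
        · right
          have hlen : L1.keys.length = L.keys.length + F1.length := by
            rw [hkeys, List.length_append]
          have hpos : 0 < F1.length := List.length_pos_iff.mpr hF1c
          omega
      have hgoal := ih (pvRelax edges R) L1 F1 (k + 1) hInv' hptnew hndnew hside'
      rw [pvBfsB, if_neg hFne]
      simp only [hcast, ← hL1, ← hF1]
      rw [← hcast2]
      exact hgoal

theorem pvRoot_get? (c : String → Bool) :
    ∀ (ws : List String) (d : PySem.Dict String Int),
    (∀ w v, d.get? w = some v → v = 1) →
    ∀ w v, (ws.foldl (fun dd w => if c w then dd.insert w 1 else dd) d).get? w = some v → v = 1 := by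
  intro ws
  induction ws with
  | nil => intro d h; exact h
  | cons x ws ih =>
    intro d h
    simp only [List.foldl_cons]
    by_cases hc : c x = true
    · simp only [hc, if_true]
      refine ih _ ?_
      intro w v hw
      rw [PySem.Dict.get?_insert] at hw
      split at hw
      · cases hw; rfl
      · exact h w v hw
    · simp only [hc, Bool.false_eq_true, if_false]
      exact ih d h

theorem pvRoot_keys_sub (c : String → Bool) :
    ∀ (ws zs : List String) (d : PySem.Dict String Int),
    (∀ w ∈ ws, w ∈ zs) → (∀ w ∈ d.keys, w ∈ zs) →
    ∀ w ∈ (ws.foldl (fun dd w => if c w then dd.insert w 1 else dd) d).keys, w ∈ zs := by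
  intro ws
  induction ws with
  | nil => intro zs d _ h; exact h
  | cons x ws ih =>
    intro zs d hws h
    simp only [List.foldl_cons]
    by_cases hc : c x = true
    · simp only [hc, if_true]
      refine ih zs _ (fun w hw => hws w (List.mem_cons_of_mem _ hw)) ?_
      intro w hw
      rcases (PySem.Dict.mem_keys_insert d x w 1).mp hw with heq | hw
      · exact heq ▸ hws x List.mem_cons_self
      · exact h w hw
    · simp only [hc, Bool.false_eq_true, if_false]
      exact ih zs d (fun w hw => hws w (List.mem_cons_of_mem _ hw)) h

theorem pvRoot_nodup (c : String → Bool) :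
    ∀ (ws : List String) (d : PySem.Dict String Int),
    d.keys.Nodup → (ws.foldl (fun dd w => if c w then dd.insert w 1 else dd) d).keys.Nodup := by
  intro ws
  induction ws with
  | nil => intro d h; exact h
  | cons x ws ih =>
    intro d h
    simp only [List.foldl_cons]
    by_cases hc : c x = true
    · simp only [hc, if_true]
      exact ih _ (PySem.Dict.nodup_keys_insert _ _ _ h)
    · simp only [hc, Bool.false_eq_true, if_false]
      exact ih d h

theorem pv_main : ∀ (n : Int) (edges : List (String × String)) (query_string : List String),
    calculate_value_of_string n edges query_string
      = calculate_value_of_string_alt n edges query_string := by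
  intro n edges query
  simp only [calculate_value_of_string, calculate_value_of_string_alt, pvBuildA_split]
  simp only [pvCond_eq]
  set wordsL : List String :=
    edges.foldl (fun s e => PySem.Set.add (PySem.Set.add s e.1) e.2) PySem.Set.empty with hwordsL
  set graph : PySem.Dict String (List String) :=
    edges.foldl (fun g e => g.insert e.1 (g.getD e.1 [] ++ [e.2])) PySem.Dict.empty with hgraph
  set c : String → Bool :=
    fun w => !(PySem.Set.ofList (edges.map (·.2))).contains w with hc
  -- A's root loop = B's level0 dict (queue = its keys)
  obtain ⟨hq, hd⟩ := pvRoots_eq c wordsL [] PySem.Dict.empty (pvWords_nodup edges)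
    (by simp [PySem.Dict.keys, PySem.Dict.empty])
    (fun w _ => PySem.Dict.contains_empty w)
  rw [hq, hd]
  set L0 : PySem.Dict String Int :=
    wordsL.foldl (fun dd w => if c w then dd.insert w 1 else dd) PySem.Dict.empty with hL0
  -- facts about L0
  have hval1 : ∀ w v, L0.get? w = some v → v = 1 := by
    refine pvRoot_get? c wordsL PySem.Dict.empty ?_
    intro w v hw
    rw [PySem.Dict.get?_empty] at hw
    cases hw
  have hnd0 : L0.keys.Nodup := by
    refine pvRoot_nodup c wordsL PySem.Dict.empty ?_
    simp [PySem.Dict.keys, PySem.Dict.empty]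
  have hsub0 : ∀ w ∈ L0.keys, w ∈ wordsL := by
    refine pvRoot_keys_sub c wordsL wordsL PySem.Dict.empty (fun w hw => hw) ?_
    intro w hw
    simp [PySem.Dict.keys, PySem.Dict.empty] at hw
  have hinv1 : ∀ w ∈ L0.keys, L0.contains w = true ∧ L0.getD w 0 = 1 := by
    intro w hw
    have hcw : L0.contains w = true := (PySem.Dict.contains_iff_mem_keys _ _).mpr hw
    obtain ⟨v, hv⟩ : ∃ v, L0.get? w = some v := by
      rw [PySem.Dict.contains_eq_isSome_get?] at hcw
      exact Option.isSome_iff_exists.mp hcw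
    exact ⟨hcw, by rw [PySem.Dict.getD_of_get?_eq_some _ _ hv, hval1 w v hv]⟩
  -- queue BFS = layered BFS
  have hbfs := pvBfs_eq graph graph (fun u => rfl)
    (L0.keys.length + 2 * pvFresh graph.values.flatten L0) L0 L0.keys 1 le_rfl hinv1
  rw [hbfs]
  -- the invariant at round 0
  have hInv0 : pvInv edges wordsL 0 L0 L0.keys := by
    refine ⟨?_, ?_, ?_, hsub0, hnd0⟩
    · intro w v hv
      rw [hval1 w v hv]
      norm_num
    · intro w
      constructor
      · intro hw
        obtain ⟨hcw, _⟩ := hinv1 w hw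
        obtain ⟨v, hv⟩ : ∃ v, L0.get? w = some v := by
          rw [PySem.Dict.contains_eq_isSome_get?] at hcw
          exact Option.isSome_iff_exists.mp hcw
        rw [hv, hval1 w v hv]
        norm_num
      · intro hv
        have hcw : L0.contains w = true := by
          rw [PySem.Dict.contains_eq_isSome_get?, hv]; rfl
        exact (PySem.Dict.contains_iff_mem_keys _ _).mp hcw
    · intro a b va _ ha hva
      have := hval1 a va ha
      omega
  -- the relaxation loop = the layered BFS, pointwise
  have hpt : pvPtEq (pvIterRelax edges wordsL.length L0) (pvBfsB graph L0 L0.keys (((0 : Nat) : Int) + 1)) := by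
    refine pvRELB edges wordsL graph hgraph hwordsL wordsL.length L0 L0 L0.keys 0 hInv0
      (fun w => rfl) hnd0 ?_
    cases hk : L0.keys with
    | nil => exact Or.inl rfl
    | cons x xs =>
      right
      exact Nat.lt_add_of_pos_left (by simp)
  have hpt' : pvPtEq (pvIterRelax edges wordsL.length L0) (pvBfsB graph L0 L0.keys 1) := by
    have : (((0 : Nat) : Int) + 1) = 1 := by norm_num
    rw [this] at hpt
    exact hpt
  -- both sums agree pointwise
  rw [pvSum_eq]
  have hgd : ∀ w, (pvBfsB graph L0 L0.keys 1).getD w (-1)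
      = (pvIterRelax edges wordsL.length L0).getD w (-1) := by
    intro w
    rw [PySem.Dict.getD_eq_get?_getD, PySem.Dict.getD_eq_get?_getD, hpt' w]
  simp only [hgd]

-- ===== VERDICT (by name: the statement is the Claim_ definition above) =====
theorem calculate_value_of_string_spec : Claim_equal_calculate_value_of_string := by
  intro n edges q _
  unfold Spec_calculate_value_of_string
  exact pv_main n edges q
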